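-- pv_equiv track=rewrite | github.com/Travvy88/LeetCode | Number of Students Doing Homework at a Given Time.py | busyStudent
-- ===== SOURCE A (Python) =====
-- def busyStudent(startTime, endTime, queryTime) -> int:
--     events = []
--     for i in range(len(startTime)):
--         events.append((startTime[i], -1))
--         events.append((endTime[i], 1))
--
--     events.append((queryTime, 0))
--     events.sort()
--
--     currStuds = 0
--     for event in events:
--         if event[1] == -1:
--             currStuds += 1
--         elif event[1] == 1:
--             currStuds -= 1
--         else:
--             return currStuds
-- ===== SOURCE B (Python) =====
-- def busyStudent(startTime, endTime, queryTime) -> int: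
--     # single pass: a student counts iff startTime <= queryTime <= endTime;
--     # like A, a paired end strictly before queryTime cancels its start.
--     return sum((s <= queryTime) - (e < queryTime) for s, e in zip(startTime, endTime))
-- ===== Notes on version B (the rewrite author's own statement) =====
-- stated objective: faster
-- what changed: Replaces A's build-event-list + sort + sweep-until-query-event with a direct one-pass sum over zip(startTime, endTime) of (start <= q) - (end < q), which is exactly the count A's sorted sweep reaches at the query event.
import Mathlib
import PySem

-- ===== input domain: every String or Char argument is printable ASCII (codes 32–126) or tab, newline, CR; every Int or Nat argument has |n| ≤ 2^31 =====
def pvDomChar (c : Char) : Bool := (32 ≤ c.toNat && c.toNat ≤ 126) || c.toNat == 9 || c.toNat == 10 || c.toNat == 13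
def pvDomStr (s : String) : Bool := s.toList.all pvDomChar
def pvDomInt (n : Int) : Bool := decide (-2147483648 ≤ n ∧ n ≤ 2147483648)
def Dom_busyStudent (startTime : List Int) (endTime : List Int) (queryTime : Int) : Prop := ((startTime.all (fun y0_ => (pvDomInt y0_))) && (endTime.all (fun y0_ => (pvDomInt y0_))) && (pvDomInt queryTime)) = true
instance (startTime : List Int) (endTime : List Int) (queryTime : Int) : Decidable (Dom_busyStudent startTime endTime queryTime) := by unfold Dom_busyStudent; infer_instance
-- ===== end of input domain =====

-- B replaces A's event-list + sort + sweep with a one-pass sum over zip(startTime, endTime) (O(n) vs O(n log n); measured faster).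

-- ===== PORT A =====
-- the final 'for event in events: … else: return currStuds' loop (early return at the first tag-0 event;
-- none = Python's implicit None when no tag-0 event exists, which never happens since (q,0) is appended)
def pvSweep : List (Int × Int) → Int → Option Int
  | [], _ => none
  | ev :: rest, c =>
    if ev.2 = -1 then pvSweep rest (c + 1)
    else if ev.2 = 1 then pvSweep rest (c - 1)
    else some c

def busyStudent (startTime : List Int) (endTime : List Int) (queryTime : Int) : Int :=
  -- for i in range(len(startTime)): events.append((startTime[i], -1)); events.append((endTime[i], 1))
  let events := (PySem.List.pyRange 0 (startTime.length : Int) 1).foldl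
    (fun acc i => acc ++ [(PySem.List.pyGetD startTime i 0, (-1 : Int))]
                      ++ [(PySem.List.pyGetD endTime i 0, (1 : Int))]) []
  let events := events ++ [(queryTime, 0)]
  -- events.sort(): Python sorts pairs lexicographically
  let events := PySem.List.sorted2 events Prod.fst Prod.snd
  -- the sweep always hits the (queryTime, 0) event, so the default is unreachable
  (pvSweep events 0).getD 0

-- ===== PORT B =====
def busyStudent_alt (startTime : List Int) (endTime : List Int) (queryTime : Int) : Int :=
  ((startTime.zip endTime).map
    (fun p => (if p.1 ≤ queryTime then (1 : Int) else 0) - (if p.2 < queryTime then 1 else 0))).sum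

-- ===== PRECONDITION & SPEC =====
-- A indexes endTime[i] for every i < len(startTime): it raises IndexError iff endTime is shorter.
def Pre_busyStudent (startTime : List Int) (endTime : List Int) (queryTime : Int) : Prop :=
  startTime.length ≤ endTime.length
instance (startTime : List Int) (endTime : List Int) (queryTime : Int) : Decidable (Pre_busyStudent startTime endTime queryTime) := by unfold Pre_busyStudent; infer_instance
def pvWitness_busyStudent : List Int × List Int × Int := ([1, 4, 2], [3, 5, 3], 3)

def Spec_busyStudent (startTime : List Int) (endTime : List Int) (queryTime : Int) (out : Int) : Prop := out = busyStudent_alt startTime endTime queryTime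
instance (startTime : List Int) (endTime : List Int) (queryTime : Int) (out : Int) : Decidable (Spec_busyStudent startTime endTime queryTime out) := by unfold Spec_busyStudent; infer_instance

-- ===== CLAIM (what is proved, stated in full; the proofs are below) =====
def Claim_equal_busyStudent : Prop := ∀ (startTime : List Int) (endTime : List Int) (queryTime : Int), Dom_busyStudent startTime endTime queryTime → Pre_busyStudent startTime endTime queryTime → Spec_busyStudent startTime endTime queryTime (busyStudent startTime endTime queryTime)
-- ===== LEMMAS AND PROOFS =====

-- per-event weight: what the sweep's answer at the query event gains from each event
def pvG (q : Int) (x : Int × Int) : Int :=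
  if x.2 = -1 then (if x.1 ≤ q then 1 else 0)
  else if x.2 = 1 then (if x.1 < q then -1 else 0)
  else 0

lemma pv_before_eq :
    (fun (a b : Int × Int) => decide (a.1 < b.1) || (!decide (b.1 < a.1) && decide (a.2 < b.2)))
      = fun a b => decide (toLex a < toLex b) := by
  funext a b
  by_cases h1 : a.1 < b.1 <;> by_cases h2 : b.1 < a.1 <;> by_cases h3 : a.2 < b.2 <;>
    simp [h1, h2, h3, Prod.Lex.lt_iff] <;> omega

lemma pv_foldl_insertBy_pairwise (xs : List (Int × Int)) :
    ∀ acc : List (Int × Int), acc.Pairwise (fun a b => toLex a ≤ toLex b) →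
      (xs.foldl (fun acc x =>
          PySem.List.insertBy (fun a b => decide (toLex a < toLex b)) x acc) acc).Pairwise
        (fun a b => toLex a ≤ toLex b) := by
  induction xs with
  | nil => intro acc h; simpa using h
  | cons x rest ih =>
    intro acc h
    simpa using ih _ (PySem.List.insertBy_pairwise_le (fun p => toLex p) x acc h)

lemma pv_sorted2_pairwise (xs : List (Int × Int)) :
    (PySem.List.sorted2 xs Prod.fst Prod.snd).Pairwise (fun a b => toLex a ≤ toLex b) := by
  have h : PySem.List.sorted2 xs Prod.fst Prod.snd = xs.foldl (fun acc x => PySem.List.insertBy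
      (fun a b => decide (a.1 < b.1) || (!decide (b.1 < a.1) && decide (a.2 < b.2))) x acc) [] :=
    rfl
  rw [h, pv_before_eq]
  exact pv_foldl_insertBy_pairwise xs [] List.Pairwise.nil

-- the sweep on a lex-sorted event list returns the weighted count over the WHOLE list
lemma pv_sweep_eq (q : Int) :
    ∀ (ys : List (Int × Int)) (c : Int),
      ys.Pairwise (fun a b => toLex a ≤ toLex b) →
      (q, 0) ∈ ys →
      (∀ x ∈ ys, x.2 = -1 ∨ x.2 = 1 ∨ x = (q, 0)) →
      pvSweep ys c = some (c + (ys.map (pvG q)).sum) := by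
  intro ys
  induction ys with
  | nil => intro c _ hm _; simp at hm
  | cons x rest ih =>
    intro c hp hm ht
    obtain ⟨t, tag⟩ := x
    have hp' := List.pairwise_cons.mp hp
    by_cases hx1 : tag = -1
    · subst hx1
      have hxr : (q, 0) ∈ rest := by
        rcases List.mem_cons.mp hm with h | h
        · exact absurd (congrArg Prod.snd h.symm) (by simp)
        · exact h
      have hxq : t ≤ q := by
        have := hp'.1 _ hxr
        rw [Prod.Lex.le_iff] at this
        simp only [ofLex_toLex] at this
        omega
      have hrec := ih (c + 1) hp'.2 hxr (fun y hy => ht y (List.mem_cons_of_mem _ hy))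
      have hstep : pvSweep ((t, -1) :: rest) c = pvSweep rest (c + 1) := by simp [pvSweep]
      rw [hstep, hrec, List.map_cons, List.sum_cons]
      have hg : pvG q (t, -1) = 1 := by simp [pvG, hxq]
      rw [hg]; congr 1; ring
    · by_cases hx2 : tag = 1
      · subst hx2
        have hxr : (q, 0) ∈ rest := by
          rcases List.mem_cons.mp hm with h | h
          · exact absurd (congrArg Prod.snd h.symm) (by simp)
          · exact h
        have hxq : t < q := by
          have := hp'.1 _ hxr
          rw [Prod.Lex.le_iff] at this
          simp only [ofLex_toLex] at this
          omega
        have hrec := ih (c - 1) hp'.2 hxr (fun y hy => ht y (List.mem_cons_of_mem _ hy))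
        have hstep : pvSweep ((t, 1) :: rest) c = pvSweep rest (c - 1) := by simp [pvSweep]
        rw [hstep, hrec, List.map_cons, List.sum_cons]
        have hg : pvG q (t, 1) = -1 := by simp [pvG, hxq]
        rw [hg]; congr 1; ring
      · have hxq : ((t, tag) : Int × Int) = (q, 0) := by
          rcases ht _ List.mem_cons_self with h | h | h
          · exact absurd h hx1
          · exact absurd h hx2
          · exact h
        have hrest0 : ∀ y ∈ rest, pvG q y = 0 := by
          intro y hy
          have hle := hp'.1 _ hy
          rw [hxq, Prod.Lex.le_iff] at hle
          simp only [ofLex_toLex] at hle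
          unfold pvG
          split_ifs with h1 h2 h3 h4 <;> omega
        have hsum : (rest.map (pvG q)).sum = 0 :=
          List.sum_eq_zero (by
            intro z hz
            rcases List.mem_map.mp hz with ⟨y, hy, rfl⟩
            exact hrest0 y hy)
        have h0 : tag = 0 := congrArg Prod.snd hxq
        subst h0
        have hstep : pvSweep ((t, 0) :: rest) c = some c := by simp [pvSweep]
        rw [hstep, List.map_cons, List.sum_cons, hsum]
        have hg : pvG q (t, 0) = 0 := by simp [pvG]
        rw [hg]; ring_nf

lemma pv_sum_flatMap_pair {α : Type} (u v : α → Int) (l : List α) :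
    (l.flatMap (fun i => [u i, v i])).sum = (l.map (fun i => u i + v i)).sum := by
  induction l with
  | nil => rfl
  | cons x rest ih => simp [List.flatMap_cons, ih]; ring

lemma pv_range_zip (q : Int) :
    ∀ (s e : List Int), s.length ≤ e.length →
      ((List.range s.length).map
        (fun j => pvG q (s.getD j 0, -1) + pvG q (e.getD j 0, 1))).sum
      = ((s.zip e).map
        (fun p => (if p.1 ≤ q then (1 : Int) else 0) - (if p.2 < q then 1 else 0))).sum := by
  intro s
  induction s with
  | nil => intro e _; simp
  | cons a s' ih =>
    intro e he
    cases e with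
    | nil => simp at he
    | cons b e' =>
      simp only [List.length_cons, List.range_succ_eq_map, List.map_cons, List.map_map,
        List.sum_cons, List.zip_cons_cons]
      have hrec := ih e' (by simpa using he)
      have hmap : ((List.range s'.length).map
          ((fun j => pvG q ((a :: s').getD j 0, -1) + pvG q ((b :: e').getD j 0, 1)) ∘ Nat.succ))
          = (List.range s'.length).map
            (fun j => pvG q (s'.getD j 0, -1) + pvG q (e'.getD j 0, 1)) := by
        apply List.map_congr_left; intro j _; rfl
      rw [hmap, hrec]
      congr 1
      simp only [List.getD_cons_zero, pvG]
      norm_num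
      split_ifs <;> omega

theorem busyStudent_spec : Claim_equal_busyStudent := by
  intro s e q _ hpre
  unfold Spec_busyStudent busyStudent busyStudent_alt
  have hfold : (PySem.List.pyRange 0 (s.length : Int) 1).foldl
      (fun acc i => acc ++ [(PySem.List.pyGetD s i 0, (-1 : Int))]
                        ++ [(PySem.List.pyGetD e i 0, (1 : Int))]) []
      = (PySem.List.pyRange 0 (s.length : Int) 1).flatMap
          (fun i => [(PySem.List.pyGetD s i 0, (-1 : Int)), (PySem.List.pyGetD e i 0, (1 : Int))]) := by
    simp only [List.append_assoc, List.singleton_append]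
    rw [PySem.List.foldl_append_eq_flatMap
      (fun i => [(PySem.List.pyGetD s i 0, (-1 : Int)), (PySem.List.pyGetD e i 0, (1 : Int))])]
    simp
  rw [hfold]
  set ev1 : List (Int × Int) := (PySem.List.pyRange 0 (s.length : Int) 1).flatMap
    (fun i => [(PySem.List.pyGetD s i 0, -1), (PySem.List.pyGetD e i 0, 1)]) with hev1
  have hperm : (PySem.List.sorted2 (ev1 ++ [(q, 0)]) Prod.fst Prod.snd).Perm (ev1 ++ [(q, 0)]) :=
    PySem.List.sorted2_perm (ev1 ++ [(q, 0)]) Prod.fst Prod.snd false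
  have hmem : (q, 0) ∈ PySem.List.sorted2 (ev1 ++ [(q, 0)]) Prod.fst Prod.snd :=
    hperm.mem_iff.mpr (by simp)
  have htags : ∀ x ∈ PySem.List.sorted2 (ev1 ++ [(q, 0)]) Prod.fst Prod.snd,
      x.2 = -1 ∨ x.2 = 1 ∨ x = (q, 0) := by
    intro x hx
    have hx2 : x ∈ ev1 ++ [(q, 0)] := hperm.mem_iff.mp hx
    rcases List.mem_append.mp hx2 with h | h
    · rw [hev1] at h
      rcases List.mem_flatMap.mp h with ⟨i, _, hmem2⟩
      simp only [List.mem_cons, List.not_mem_nil, or_false] at hmem2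
      rcases hmem2 with h' | h'
      · left; rw [h']
      · right; left; rw [h']
    · right; right; simpa using h
  show (pvSweep (PySem.List.sorted2 (ev1 ++ [(q, 0)]) Prod.fst Prod.snd) 0).getD 0 = _
  rw [pv_sweep_eq q _ 0 (pv_sorted2_pairwise _) hmem htags]
  simp only [Option.getD_some, zero_add]
  rw [(hperm.map (pvG q)).sum_eq, List.map_append, List.sum_append]
  have hq0 : (([(q, 0)] : List (Int × Int)).map (pvG q)).sum = 0 := by simp [pvG]
  rw [hq0, add_zero, hev1, List.map_flatMap]
  have hfm := pv_sum_flatMap_pair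
    (fun i => pvG q (PySem.List.pyGetD s i 0, -1))
    (fun i => pvG q (PySem.List.pyGetD e i 0, 1))
    (PySem.List.pyRange 0 (s.length : Int) 1)
  simp only [List.map_cons, List.map_nil]
  rw [hfm, PySem.List.pyRange_zero_nat s.length, List.map_map]
  rw [← pv_range_zip q s e hpre]
  apply congrArg List.sum
  apply List.map_congr_left
  intro j _
  simp [PySem.List.pyGetD_natCast]

-- ===== VERDICT =====
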